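-- pv_equiv track=rewrite | github.com/anthonytorlucci/segytools | src/segytools/segpy/util.py | measure_stride
-- ===== SOURCE A (Python) =====
-- from itertools import (islice, cycle, tee, chain, repeat)
--
-- def pairwise(iterable):
--     a, b = tee(iterable)
--     next(b)
--     yield from zip(a, b)
--
-- def measure_stride(iterable):
--     """Determine whether successive numeric items differ by a constant amount.
--
--     Args:
--         iterable: An iterable series of numeric values.
--
--     Returns:
--         The difference between successive values (e.g. item[1] - item[0]) if
--         that difference is the same between all successive pairs, otherwise
--         None.
--     """
--     stride = None
--     for a, b in pairwise(iterable):
--         new_stride = b - a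
--         if stride is None:
--             stride = new_stride
--         elif stride != new_stride:
--             return None
--     return stride
-- ===== SOURCE B (Python) =====
-- def measure_stride(iterable):
--     items = list(iterable)
--     if len(items) < 2:
--         return None
--     x0 = items[0]
--     d = items[1] - x0
--     return d if all(x == x0 + i * d for i, x in enumerate(items)) else None
-- ===== Notes on version B (the rewrite author's own statement) =====
-- stated objective: alternative
-- what changed: B never forms successive differences: it extrapolates the affine law x0 + i*d from the first two items and verifies every element against its predicted value by index, instead of A's interleaved pairwise scan with an Optional stride accumulator.
import Mathlib
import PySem

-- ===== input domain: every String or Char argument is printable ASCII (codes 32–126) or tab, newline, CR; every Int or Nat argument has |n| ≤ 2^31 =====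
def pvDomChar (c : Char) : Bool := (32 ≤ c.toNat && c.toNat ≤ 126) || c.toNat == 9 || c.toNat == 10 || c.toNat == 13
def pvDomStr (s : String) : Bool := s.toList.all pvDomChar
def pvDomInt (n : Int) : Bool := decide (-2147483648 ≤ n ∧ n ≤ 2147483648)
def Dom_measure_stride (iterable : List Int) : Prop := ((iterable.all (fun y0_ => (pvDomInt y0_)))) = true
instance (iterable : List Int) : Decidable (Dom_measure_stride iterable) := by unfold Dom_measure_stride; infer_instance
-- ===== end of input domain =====

-- B replaces A's pairwise-difference scan with an affine-extrapolation check (x[i] == x0 + i*d); return-value equivalence on nonempty lists.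

-- ===== PORT A =====
-- A's loop over pairwise(iterable) with the Option stride accumulator and early return
def msLoopA (stride : Option Int) : List (Int × Int) → Option Int
  | [] => stride
  | (a, b) :: rest =>
    let new_stride := b - a
    match stride with
    | none => msLoopA (some new_stride) rest
    | some s => if s ≠ new_stride then none else msLoopA stride rest

def measure_stride (iterable : List Int) : Option Int :=
  msLoopA none (iterable.zip iterable.tail)   -- pairwise(iterable) = zip(xs, xs[1:])

-- ===== PORT B =====
def measure_stride_alt (iterable : List Int) : Option Int :=
  match iterable with
  | x0 :: x1 :: _ =>
    let d := x1 - x0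
    if (PySem.List.enumerate iterable).all (fun p => p.2 == x0 + p.1 * d) then some d
    else none
  | _ => none

-- ===== PRECONDITION & SPEC =====
-- Pre_ excludes only the empty list, on which A raises RuntimeError (StopIteration escaping the pairwise generator).
def Pre_measure_stride (iterable : List Int) : Prop := iterable ≠ []
instance (iterable : List Int) : Decidable (Pre_measure_stride iterable) := by unfold Pre_measure_stride; infer_instance
def pvWitness_measure_stride : List Int := ([1, 3, 5])

def Spec_measure_stride (iterable : List Int) (out : Option Int) : Prop := out = measure_stride_alt iterable
instance (iterable : List Int) (out : Option Int) : Decidable (Spec_measure_stride iterable out) := by unfold Spec_measure_stride; infer_instance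

-- ===== CLAIM =====
def Claim_equal_measure_stride : Prop := ∀ (iterable : List Int), Dom_measure_stride iterable → Pre_measure_stride iterable → Spec_measure_stride iterable (measure_stride iterable)

-- ===== LEMMAS AND PROOFS =====
lemma msLoopA_some (s : Int) (ps : List (Int × Int)) :
    msLoopA (some s) ps = if ps.all (fun p => p.2 - p.1 == s) then some s else none := by
  induction ps with
  | nil => simp [msLoopA]
  | cons p rest ih =>
    obtain ⟨a, b⟩ := p
    by_cases h : b - a = s
    · subst h
      simp only [msLoopA, List.all_cons, ih, beq_self_eq_true, Bool.true_and]
      simp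
    · simp [msLoopA, h, Ne.symm h]

-- diffs-all-equal-d ↔ every element equals its affine prediction, with the index base generalized
lemma diffs_eq_affine (d : Int) (ys : List Int) : ∀ (c k : Int),
    ((c :: ys).zip ys).all (fun p => p.2 - p.1 == d) =
      (PySem.List.enumerate ys (k + 1)).all (fun p => p.2 == (c - k * d) + p.1 * d) := by
  induction ys with
  | nil => intro c k; simp [PySem.List.enumerate]
  | cons y zs ih =>
    intro c k
    simp only [List.zip_cons_cons, PySem.List.enumerate_cons, List.all_cons]
    by_cases h : y - c = d
    · have h1 : (y - c == d) = true := by simp [h]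
      have h2 : (y == c - k * d + (k + 1) * d) = true := by
        have : y = c + d := by omega
        simp [this]; ring
      rw [h1, h2, Bool.true_and, Bool.true_and, ih y (k + 1)]
      have : y - (k + 1) * d = c - k * d := by
        have : y = c + d := by omega
        rw [this]; ring
      rw [this]
    · have h1 : (y - c == d) = false := by simp [h]
      have h2 : (y == c - k * d + (k + 1) * d) = false := by
        simp; intro he; apply h; rw [he]; ring
      simp [h1, h2]

-- ===== VERDICT =====
theorem measure_stride_spec : Claim_equal_measure_stride := by
  intro xs _ hpre
  unfold Spec_measure_stride
  match xs with
  | [] => exact absurd rfl hpre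
  | [x] => rfl
  | x0 :: x1 :: rest =>
    unfold measure_stride measure_stride_alt
    simp only [List.tail_cons, List.zip_cons_cons, msLoopA, PySem.List.enumerate_cons,
      List.all_cons]
    rw [msLoopA_some, diffs_eq_affine (x1 - x0) rest x1 1]
    have e0 : (x0 == x0 + 0 * (x1 - x0)) = true := by simp
    have e1 : (x1 == x0 + (0 + 1) * (x1 - x0)) = true := by simp
    have eb : x1 - 1 * (x1 - x0) = x0 := by ring
    simp only [e0, e1, eb, Bool.true_and]
    have h2 : (0 : Int) + 1 + 1 = 1 + 1 := by ring
    simp only [h2]
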